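-- pv_equiv track=rewrite | github.com/gunho30811/boj | 백준/Bronze/18312. 시각/시각.py | count_times_with_k
-- ===== SOURCE A (Python) =====
-- def count_times_with_k(N, K):
--     count = 0
--     K = str(K)  # 숫자 K를 문자열로 변환
--
--     for hour in range(N + 1):
--         for minute in range(60):
--             for second in range(60):
--                 # 현재 시각을 문자열로 변환
--                 current_time = f"{hour:02d}{minute:02d}{second:02d}"
--                 if K in current_time:
--                     count += 1
--     return count
-- ===== SOURCE B (Python) =====
-- def count_times_with_k(N, K):
--     Ks = str(K)
--     L = len(Ks)
--     # all 3600 "MMSS" blocks, built once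
--     table = [f"{m:02d}{s:02d}" for m in range(60) for s in range(60)]
--     memo = {}
--     total = 0
--     for hour in range(N + 1):
--         hs = f"{hour:02d}"
--         if Ks in hs:
--             total += 3600
--         else:
--             # an occurrence of Ks in hs+mmss that is not inside hs uses at most
--             # the last L-1 characters of hs, so only that suffix matters
--             t = hs[max(0, len(hs) - (L - 1)):]
--             v = memo.get(t)
--             if v is None:
--                 v = sum(1 for w in table if Ks in t + w)
--                 memo[t] = v
--             total += v
--     return total
-- ===== Notes on version B (the rewrite author's own statement) =====
-- stated objective: faster
-- what changed: Instead of re-scanning all 3600 minute/second combinations for every hour, B precomputes the 3600 MMSS blocks once and memoises the per-hour inner count keyed by the last len(str(K))-1 characters of the hour string (the only part an occurrence of K not already inside the hour string can use), so the inner scan runs only once per distinct suffix.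
import Mathlib
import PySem

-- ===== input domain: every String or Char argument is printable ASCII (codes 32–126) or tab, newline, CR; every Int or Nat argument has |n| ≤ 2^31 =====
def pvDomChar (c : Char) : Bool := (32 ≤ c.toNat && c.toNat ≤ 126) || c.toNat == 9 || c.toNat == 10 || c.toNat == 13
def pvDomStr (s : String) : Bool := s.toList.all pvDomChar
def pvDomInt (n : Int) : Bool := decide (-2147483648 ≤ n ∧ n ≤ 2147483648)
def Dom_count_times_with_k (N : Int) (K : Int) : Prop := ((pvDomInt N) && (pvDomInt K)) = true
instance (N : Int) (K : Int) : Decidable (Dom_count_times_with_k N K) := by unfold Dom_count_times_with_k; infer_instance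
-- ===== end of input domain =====

-- B memoises the per-hour inner count by the (≤ len(K)-1)-character suffix of the hour string,
-- so the 3600-iteration inner loop runs only once per distinct suffix instead of once per hour (objective: faster).

-- ===== PORT A =====
-- f"{n:02d}": zero-pad str(n) to width 2; for width 2 this is exactly str(n).zfill(2)
def pvFmt2 (n : Int) : List Char := PySem.Chars.zfill (PySem.Int.toChars n) 2

def count_times_with_k (N : Int) (K : Int) : Int :=
  let Ks := PySem.Int.toChars K
  (PySem.List.pyRange 0 (N + 1) 1).foldl (fun count hour =>
    (PySem.List.pyRange 0 60 1).foldl (fun count minute =>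
      (PySem.List.pyRange 0 60 1).foldl (fun count second =>
        let current_time := pvFmt2 hour ++ pvFmt2 minute ++ pvFmt2 second
        if PySem.Chars.isIn Ks current_time then count + 1 else count)
      count) count) 0

-- ===== PORT B =====
-- [f"{m:02d}{s:02d}" for m in range(60) for s in range(60)]
def pvTable : List (List Char) :=
  (PySem.List.pyRange 0 60 1).flatMap (fun m =>
    (PySem.List.pyRange 0 60 1).map (fun s => pvFmt2 m ++ pvFmt2 s))

def count_times_with_k_alt (N : Int) (K : Int) : Int :=
  let Ks := PySem.Int.toChars K
  let L : Int := Ks.length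
  -- state: (total, memo)
  ((PySem.List.pyRange 0 (N + 1) 1).foldl
    (fun (st : Int × PySem.Dict (List Char) Int) hour =>
      let hs := pvFmt2 hour
      if PySem.Chars.isIn Ks hs then (st.1 + 3600, st.2)
      else
        -- hs[max(0, len(hs) - (L-1)):]  (nonnegative in-range start, so the slice is a drop)
        let t := hs.drop (max 0 ((hs.length : Int) - (L - 1))).toNat
        match st.2.get? t with
        | some v => (st.1 + v, st.2)
        | none =>
            let v := pvTable.foldl (fun c w =>
              if PySem.Chars.isIn Ks (t ++ w) then c + 1 else c) 0
            (st.1 + v, st.2.insert t v))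
    ((0 : Int), PySem.Dict.empty)).1

-- ===== PRECONDITION & SPEC =====
def Spec_count_times_with_k (N : Int) (K : Int) (out : Int) : Prop := out = count_times_with_k_alt N K
instance (N : Int) (K : Int) (out : Int) : Decidable (Spec_count_times_with_k N K out) := by unfold Spec_count_times_with_k; infer_instance

-- ===== CLAIM (what is proved, stated in full; the proofs are below) =====
def Claim_equal_count_times_with_k : Prop := ∀ (N : Int) (K : Int), Dom_count_times_with_k N K → Spec_count_times_with_k N K (count_times_with_k N K)

-- ===== LEMMAS AND PROOFS =====

-- the per-hour inner count, as B computes it for a suffix t (and as A computes it for hs)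
def pvCnt (Ks t : List Char) : Int :=
  pvTable.foldl (fun c w => if PySem.Chars.isIn Ks (t ++ w) then c + 1 else c) 0

theorem pvTable_length : pvTable.length = 3600 := by
  simp [pvTable, List.length_flatMap, PySem.List.length_pyRange_one]

-- an occurrence of K in a ++ w that is not inside a lies in (last (|K|-1) chars of a) ++ w
theorem pv_infix_append_drop (K a w : List Char) (h : ¬ K <:+: a) :
    (K <:+: a ++ w ↔ K <:+: a.drop (a.length - (K.length - 1)) ++ w) := by
  have hK : K ≠ [] := by rintro rfl; exact h List.nil_infix
  have hKlen : 1 ≤ K.length := List.length_pos_iff.mpr hK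
  set n := a.length - (K.length - 1) with hn
  have hna : n ≤ a.length := Nat.sub_le _ _
  constructor
  · rintro ⟨s, u, hsu⟩
    by_cases hc : s.length + K.length ≤ a.length
    · exfalso
      apply h
      have hpre : (s ++ K) <+: a ++ w := ⟨u, by simpa using hsu⟩
      have hlen : (s ++ K).length ≤ a.length := by simp; omega
      have hpa : (s ++ K) <+: a := by
        have := List.prefix_iff_eq_take.mp hpre
        rw [List.take_append_of_le_length hlen] at this
        rw [this]
        exact List.take_prefix _ _
      exact ((List.suffix_append s K).isInfix).trans hpa.isInfix
    · have hns : n ≤ s.length := by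
        have := congrArg List.length hsu
        simp at this
        omega
      refine ⟨s.drop n, u, ?_⟩
      have hdrop : (s ++ (K ++ u)).drop n = (a ++ w).drop n := by
        rw [← List.append_assoc, hsu]
      rw [List.drop_append_of_le_length hns] at hdrop
      rw [List.drop_append_of_le_length hna] at hdrop
      simpa [List.append_assoc] using hdrop
  · intro hinf
    have hdw : a.drop n ++ w = (a ++ w).drop n := (List.drop_append_of_le_length hna).symm
    rw [hdw] at hinf
    exact hinf.trans (List.drop_suffix n (a ++ w)).isInfix

theorem pvCnt_full (Ks hs : List Char) (h : PySem.Chars.isIn Ks hs = true) :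
    pvCnt Ks hs = 3600 := by
  have hinf : Ks <:+: hs := (PySem.Chars.isIn_iff_infix _ _).mp h
  unfold pvCnt
  rw [PySem.List.foldl_if_add_one]
  have hall : ∀ w ∈ pvTable, PySem.Chars.isIn Ks (hs ++ w) = true := by
    intro w _
    exact (PySem.Chars.isIn_iff_infix _ _).mpr (hinf.trans (List.prefix_append hs w).isInfix)
  rw [List.countP_eq_length.mpr (by intro w hw; exact hall w hw), pvTable_length]
  norm_num

theorem pvCnt_suffix (Ks hs : List Char) (h : PySem.Chars.isIn Ks hs = false) :
    pvCnt Ks hs = pvCnt Ks (hs.drop (hs.length - (Ks.length - 1))) := by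
  have hninf : ¬ Ks <:+: hs := (PySem.Chars.isIn_eq_false_iff _ _).mp h
  unfold pvCnt
  rw [PySem.List.foldl_if_add_one, PySem.List.foldl_if_add_one]
  congr 1
  have : List.countP (fun w => PySem.Chars.isIn Ks (hs ++ w)) pvTable
      = List.countP (fun w => PySem.Chars.isIn Ks (hs.drop (hs.length - (Ks.length - 1)) ++ w)) pvTable := by
    apply List.countP_congr
    intro w _
    simp only [PySem.Chars.isIn_iff_infix]
    exact pv_infix_append_drop Ks hs w hninf
  exact_mod_cast this

-- A's inner double loop, started at acc, adds pvCnt Ks hs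
theorem pvInnerA (Ks hs : List Char) (acc : Int) :
    (PySem.List.pyRange 0 60 1).foldl (fun count minute =>
      (PySem.List.pyRange 0 60 1).foldl (fun count second =>
        if PySem.Chars.isIn Ks (hs ++ pvFmt2 minute ++ pvFmt2 second) then count + 1 else count)
      count) acc = acc + pvCnt Ks hs := by
  unfold pvCnt pvTable
  simp only [List.foldl_flatMap, List.foldl_map, List.append_assoc,
    PySem.List.foldl_if_add_one, PySem.List.foldl_add]
  ring

-- B's loop step, named for the proofs (definitionally the lambda in count_times_with_k_alt)
def pvStepB (Ks : List Char) (st : Int × PySem.Dict (List Char) Int) (hour : Int) :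
    Int × PySem.Dict (List Char) Int :=
  let hs := pvFmt2 hour
  if PySem.Chars.isIn Ks hs then (st.1 + 3600, st.2)
  else
    let t := hs.drop (max 0 ((hs.length : Int) - ((Ks.length : Int) - 1))).toNat
    match st.2.get? t with
    | some v => (st.1 + v, st.2)
    | none =>
        let v := pvTable.foldl (fun c w =>
          if PySem.Chars.isIn Ks (t ++ w) then c + 1 else c) 0
        (st.1 + v, st.2.insert t v)

theorem pv_toNat_max (a l : Nat) (hl : 1 ≤ l) :
    (max (0 : Int) ((a : Int) - ((l : Int) - 1))).toNat = a - (l - 1) := by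
  omega

theorem pvOuter (Ks : List Char) (hours : List Int) :
    ∀ (total : Int) (memo : PySem.Dict (List Char) Int),
      (∀ t v, memo.get? t = some v → v = pvCnt Ks t) →
      (hours.foldl (pvStepB Ks) (total, memo)).1
        = hours.foldl (fun c hour => c + pvCnt Ks (pvFmt2 hour)) total := by
  induction hours with
  | nil => intro total memo _; rfl
  | cons h tl ih =>
    intro total memo inv
    simp only [List.foldl_cons]
    by_cases hin : PySem.Chars.isIn Ks (pvFmt2 h) = true
    · have hstep : pvStepB Ks (total, memo) h = (total + 3600, memo) := by
        unfold pvStepB; rw [if_pos hin]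
      rw [hstep, pvCnt_full Ks (pvFmt2 h) hin, ih _ _ inv]
    · have hfalse : PySem.Chars.isIn Ks (pvFmt2 h) = false := by
        exact Bool.not_eq_true _ ▸ (by simpa using hin)
      have hKs : Ks ≠ [] := by
        intro hnil
        rw [hnil, PySem.Chars.isIn_nil] at hfalse
        simp at hfalse
      have hKlen : 1 ≤ Ks.length := List.length_pos_iff.mpr hKs
      have hT : (max (0 : Int) (((pvFmt2 h).length : Int) - ((Ks.length : Int) - 1))).toNat
          = (pvFmt2 h).length - (Ks.length - 1) := pv_toNat_max _ _ hKlen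
      set t := (pvFmt2 h).drop ((pvFmt2 h).length - (Ks.length - 1)) with ht
      have hcnt : pvCnt Ks (pvFmt2 h) = pvCnt Ks t := pvCnt_suffix Ks (pvFmt2 h) hfalse
      cases hmg : memo.get? t with
      | some v =>
        have hstep : pvStepB Ks (total, memo) h = (total + v, memo) := by
          unfold pvStepB; rw [if_neg hin]; simp only [hT, ← ht, hmg]
        rw [hstep, ih _ _ inv, hcnt, inv t v hmg]
      | none =>
        have hV : pvCnt Ks t = pvTable.foldl (fun c w =>
            if PySem.Chars.isIn Ks (t ++ w) then c + 1 else c) 0 := rfl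
        have hstep : pvStepB Ks (total, memo) h
            = (total + pvCnt Ks t, memo.insert t (pvCnt Ks t)) := by
          unfold pvStepB; rw [if_neg hin]; simp only [hT, ← ht, hmg, hV]
        rw [hstep, hcnt]
        apply ih
        intro t' v' hget
        rw [PySem.Dict.get?_insert] at hget
        by_cases he : t' = t
        · subst he
          rw [if_pos rfl] at hget
          exact (Option.some.inj hget).symm
        · rw [if_neg he] at hget
          exact inv t' v' hget

theorem count_times_with_k_eq (N K : Int) :
    count_times_with_k N K = count_times_with_k_alt N K := by
  unfold count_times_with_k count_times_with_k_alt
  simp only [pvInnerA]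
  have hB : ((PySem.List.pyRange 0 (N + 1) 1).foldl (pvStepB (PySem.Int.toChars K))
      ((0 : Int), PySem.Dict.empty)).1
      = (PySem.List.pyRange 0 (N + 1) 1).foldl
          (fun c hour => c + pvCnt (PySem.Int.toChars K) (pvFmt2 hour)) 0 :=
    pvOuter _ _ 0 PySem.Dict.empty (by intro t v hv; simp [PySem.Dict.get?_empty] at hv)
  exact hB ▸ rfl

-- ===== VERDICT (by name: the statement is the Claim_ definition above) =====
theorem count_times_with_k_spec : Claim_equal_count_times_with_k := by
  intro N K _
  unfold Spec_count_times_with_k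
  exact count_times_with_k_eq N K
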